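-- pv_equiv track=rewrite | github.com/Shemy-code2001/PythonProjects | Exercise CP 2018.py | search
-- ===== SOURCE A (Python) =====
-- def search(M, L):
--     position = None
--     for i in range(len(L)):
--         if L[i][0].startswith(M):
--             position = L[i][1]
--     if position is None:
--         return "None"
--     return position
-- ===== SOURCE B (Python) =====
-- def search(M, L):
--     for key, val in reversed(L):
--         if key.startswith(M):
--             return val
--     return "None"
-- ===== Notes on version B (the rewrite author's own statement) =====
-- stated objective: simpler
-- what changed: Replaces the forward full scan with a last-match accumulator by an early-exit reverse scan that returns the first match in reversed(L).
import Mathlib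
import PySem

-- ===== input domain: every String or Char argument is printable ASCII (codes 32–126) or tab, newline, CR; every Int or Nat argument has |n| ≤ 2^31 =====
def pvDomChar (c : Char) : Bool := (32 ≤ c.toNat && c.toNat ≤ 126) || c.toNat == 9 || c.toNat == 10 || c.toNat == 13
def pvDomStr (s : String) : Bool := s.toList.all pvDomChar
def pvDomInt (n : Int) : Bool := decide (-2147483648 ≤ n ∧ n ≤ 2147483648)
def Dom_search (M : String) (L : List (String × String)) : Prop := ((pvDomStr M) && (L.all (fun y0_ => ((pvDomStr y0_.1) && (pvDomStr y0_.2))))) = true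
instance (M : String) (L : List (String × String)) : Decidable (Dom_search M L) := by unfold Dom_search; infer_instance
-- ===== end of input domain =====

-- B replaces A's forward scan with a last-match accumulator by an early-exit reverse scan (simpler).

-- ===== PORT A =====
-- forward loop over indices, keeping the last matching second component in `position`
def search (M : String) (L : List (String × String)) : String :=
  let position : Option String :=
    (List.range L.length).foldl
      (fun position i =>
        match PySem.List.pyGet? L (Int.ofNat i) with
        | some p => if PySem.Str.startswith p.1 M then some p.2 else position
        | none => position)
      none
  match position with
  | none => "None"
  | some v => v

-- ===== PORT B =====
-- early-exit scan over the reversed list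
def searchRevLoop (M : String) : List (String × String) → String
  | [] => "None"
  | (k, v) :: rest => if PySem.Str.startswith k M then v else searchRevLoop M rest

def search_alt (M : String) (L : List (String × String)) : String :=
  searchRevLoop M L.reverse

-- ===== PRECONDITION & SPEC =====
def Spec_search (M : String) (L : List (String × String)) (out : String) : Prop := out = search_alt M L
instance (M : String) (L : List (String × String)) (out : String) : Decidable (Spec_search M L out) := by unfold Spec_search; infer_instance

-- ===== CLAIM (what is proved, stated in full; the proofs are below) =====
def Claim_equal_search : Prop := ∀ (M : String) (L : List (String × String)), Dom_search M L → Spec_search M L (search M L)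

-- ===== LEMMAS AND PROOFS =====

-- A's accumulator after the whole loop, expressed directly on the list
def lastMatch (M : String) : List (String × String) → Option String → Option String
  | [], acc => acc
  | (k, v) :: rest, acc =>
      lastMatch M rest (if PySem.Str.startswith k M then some v else acc)

-- first match in a list, option-valued (B's loop, as an Option)
def firstMatch (M : String) : List (String × String) → Option String
  | [] => none
  | (k, v) :: rest => if PySem.Str.startswith k M then some v else firstMatch M rest

lemma foldl_eq_lastMatch (M : String) (L : List (String × String)) (acc : Option String) :
    (List.range L.length).foldl
      (fun position i =>
        match PySem.List.pyGet? L (Int.ofNat i) with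
        | some p => if PySem.Str.startswith p.1 M then some p.2 else position
        | none => position)
      acc = lastMatch M L acc := by
  induction L generalizing acc with
  | nil => simp [lastMatch]
  | cons p rest ih =>
      simp only [List.length_cons, List.range_succ_eq_map, List.foldl_cons, List.foldl_map]
      rw [show (PySem.List.pyGet? (p :: rest) (Int.ofNat 0)) = some p by
        simp [PySem.List.pyGet?, PySem.List.pyIdx?]]
      have step : ∀ (a : Option String),
          List.foldl
            (fun position i =>
              match PySem.List.pyGet? (p :: rest) (Int.ofNat (i + 1)) with
              | some q => if PySem.Str.startswith q.1 M then some q.2 else position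
              | none => position)
            a (List.range rest.length)
          = lastMatch M rest a := by
        intro a
        rw [← ih a]
        apply PySem.List.foldl_congr_mem
        intro acc' i hi
        have hi' : i < rest.length := List.mem_range.mp hi
        simp [Int.ofNat_eq_natCast, PySem.List.pyGet?_natCast, hi']
      obtain ⟨k, v⟩ := p
      cases hM : PySem.Str.startswith k M <;>
        simp only [lastMatch, hM, Bool.false_eq_true, reduceIte, step]

lemma firstMatch_append (M : String) (xs ys : List (String × String)) :
    firstMatch M (xs ++ ys)
      = match firstMatch M xs with
        | some v => some v
        | none => firstMatch M ys := by
  induction xs with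
  | nil => simp [firstMatch]
  | cons p rest ih =>
      cases hM : PySem.Str.startswith p.1 M <;>
        simp only [List.cons_append, firstMatch, hM, Bool.false_eq_true, reduceIte, ih]

lemma lastMatch_eq_firstMatch_rev (M : String) (L : List (String × String))
    (acc : Option String) :
    lastMatch M L acc
      = match firstMatch M L.reverse with
        | some v => some v
        | none => acc := by
  induction L generalizing acc with
  | nil => simp [lastMatch, firstMatch]
  | cons p rest ih =>
      cases p with
      | mk k v =>
        simp only [lastMatch, List.reverse_cons, ih, firstMatch_append]
        cases hF : firstMatch M rest.reverse <;>
          cases hM : PySem.Str.startswith k M <;>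
            simp only [hF, hM, firstMatch, Bool.false_eq_true, reduceIte]

lemma searchRevLoop_eq_firstMatch (M : String) (xs : List (String × String)) :
    searchRevLoop M xs
      = match firstMatch M xs with
        | none => "None"
        | some v => v := by
  induction xs with
  | nil => simp [searchRevLoop, firstMatch]
  | cons p rest ih =>
      cases hM : PySem.Str.startswith p.1 M <;>
        simp only [searchRevLoop, firstMatch, hM, Bool.false_eq_true, reduceIte, ih]

-- ===== VERDICT (by name: the statement is the Claim_ definition above) =====
theorem search_spec : Claim_equal_search := by
  intro M L _
  unfold Spec_search search search_alt
  rw [foldl_eq_lastMatch, lastMatch_eq_firstMatch_rev, searchRevLoop_eq_firstMatch]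
  cases firstMatch M L.reverse <;> rfl
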